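-- pv_equiv track=rewrite | github.com/jamiejamiebobamie/spd24_techInterviewQuestions | problems_spd2.py | find_closest_handles_yay
-- ===== SOURCE A (Python) =====
-- def find_closest_handles_yay(user_handle, handles_array, k):
--     """Finds the closest handles (k) to the user's handle."""
--
--     result = []
--
--     user_handle_chars = set()
--     for char in user_handle:
--         user_handle_chars.add(char)
--
--     handle_scores_dict = {}
--     for handle in handles_array:
--         score = 0
--         for char in handle:
--             if char in user_handle_chars:
--                 score += 1
--             else:
--                 score -= 1
--
--         if score not in handle_scores_dict:
--             handle_scores_dict[score] = [handle]
--         else: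
--             handle_scores_dict[score].append(handle)
--
--     while len(result) < k and len(handle_scores_dict) != 0:
--         max_key = max(handle_scores_dict.keys())
--         max_key_handles = handle_scores_dict[max_key]
--         i = 0;
--         while len(result) < k and i < len(max_key_handles):
--             handle = max_key_handles[i]
--             result.append(handle)
--             i += 1
--         del handle_scores_dict[max_key]
--     return result
-- ===== SOURCE B (Python) =====
-- import heapq
--
-- def find_closest_handles_yay(user_handle, handles_array, k):
--     """Finds the closest handles (k) to the user's handle."""
--     user_chars = set(user_handle)
--
--     def score(handle):
--         return sum(1 if c in user_chars else -1 for c in handle)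
--
--     # nlargest is a stable descending top-k selection:
--     # equivalent to sorted(handles_array, key=score, reverse=True)[:max(k, 0)]
--     return heapq.nlargest(k, handles_array, key=score)
-- ===== Notes on version B (the rewrite author's own statement) =====
-- stated objective: alternative
-- what changed: Replace A's score-bucket dict plus a while-loop that repeatedly extracts the maximum remaining key with a single stable top-k selection: heapq.nlargest(k, handles_array, key=score) over the same character-set score.
import Mathlib
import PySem

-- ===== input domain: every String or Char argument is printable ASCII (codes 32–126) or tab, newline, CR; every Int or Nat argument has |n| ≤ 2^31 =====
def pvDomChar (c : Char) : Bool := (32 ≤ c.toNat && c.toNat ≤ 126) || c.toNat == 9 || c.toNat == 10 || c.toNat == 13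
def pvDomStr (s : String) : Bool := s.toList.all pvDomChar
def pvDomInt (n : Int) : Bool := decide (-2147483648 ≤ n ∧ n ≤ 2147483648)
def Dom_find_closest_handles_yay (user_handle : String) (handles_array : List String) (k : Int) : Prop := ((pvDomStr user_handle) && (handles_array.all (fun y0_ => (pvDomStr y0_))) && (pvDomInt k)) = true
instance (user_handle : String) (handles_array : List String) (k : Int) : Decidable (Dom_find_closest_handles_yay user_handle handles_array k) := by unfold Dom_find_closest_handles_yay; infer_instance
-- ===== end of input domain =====

-- B replaces A's score-bucket dict + repeated max-key extraction by a single stable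
-- descending top-k selection (heapq.nlargest with the same score key); objective: alternative.


-- ===== PORT A =====
-- termination lemma for the outer while loop: deleting a present key shrinks the dict
theorem pv_size_erase_lt {κ ν : Type} [BEq κ] [LawfulBEq κ] (d : PySem.Dict κ ν) (m : κ)
    (hm : m ∈ d.keys) : (d.erase m).size < d.size := by
  simp only [PySem.Dict.keys, List.mem_map] at hm
  obtain ⟨p, hp, hpm⟩ := hm
  simp only [PySem.Dict.erase, PySem.Dict.size]
  refine List.length_filter_lt_length_iff_exists.mpr ⟨p, hp, ?_⟩
  simp [hpm]

-- inner while loop: append bucket elements until len(result) = k or the bucket is exhausted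
def pvInnerA (k : Int) (res : List String) (bucket : List String) : List String :=
  match bucket with
  | [] => res
  | h :: t => if (res.length : Int) < k then pvInnerA k (res ++ [h]) t else res

-- outer while loop: extract the max score bucket, append from it, delete the key
def pvLoopA (k : Int) (res : List String) (d : PySem.Dict Int (List String)) : List String :=
  if (res.length : Int) < k ∧ d.size ≠ 0 then
    match hmax : PySem.List.max? d.keys (fun x => x) with
    | none => res  -- unreachable: the dict is nonempty
    | some m => pvLoopA k (pvInnerA k res (d.getD m [])) (d.erase m)
  else res
  termination_by d.size
  decreasing_by exact pv_size_erase_lt d m (PySem.List.max?_mem hmax)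

def find_closest_handles_yay (user_handle : String) (handles_array : List String) (k : Int) : List String :=
  let user_handle_chars : PySem.Set Char :=
    user_handle.toList.foldl (fun s c => PySem.Set.add s c) PySem.Set.empty
  let handle_scores_dict : PySem.Dict Int (List String) :=
    handles_array.foldl (fun d handle =>
      let score : Int :=
        handle.toList.foldl
          (fun s c => if PySem.Set.contains user_handle_chars c then s + 1 else s - 1) 0
      if d.contains score then d.modify score [] (fun l => l ++ [handle])
      else d.insert score [handle]) PySem.Dict.empty
  pvLoopA k [] handle_scores_dict

-- ===== PORT B =====
def pvScore (chars : PySem.Set Char) (handle : String) : Int :=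
  (handle.toList.map (fun c => if PySem.Set.contains chars c then (1 : Int) else -1)).sum

-- heapq.nlargest(k, xs, key) is ported as its documented equivalent
-- sorted(xs, key=key, reverse=True)[:max(k,0)] (stable descending sort, first max(k,0) items)
def find_closest_handles_yay_alt (user_handle : String) (handles_array : List String) (k : Int) : List String :=
  let user_chars : PySem.Set Char := PySem.Set.ofList user_handle.toList
  (PySem.List.sorted handles_array (pvScore user_chars) true).take k.toNat

-- ===== PRECONDITION & SPEC =====
def Spec_find_closest_handles_yay (user_handle : String) (handles_array : List String) (k : Int) (out : List String) : Prop := out = find_closest_handles_yay_alt user_handle handles_array k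
instance (user_handle : String) (handles_array : List String) (k : Int) (out : List String) : Decidable (Spec_find_closest_handles_yay user_handle handles_array k out) := by unfold Spec_find_closest_handles_yay; infer_instance

-- ===== CLAIM (what is proved, stated in full; the proofs are below) =====
def Claim_equal_find_closest_handles_yay : Prop := ∀ (user_handle : String) (handles_array : List String) (k : Int), Dom_find_closest_handles_yay user_handle handles_array k → Spec_find_closest_handles_yay user_handle handles_array k (find_closest_handles_yay user_handle handles_array k)

-- ===== LEMMAS AND PROOFS =====

-- the canonical middle form both programs are reduced to: buckets of equal score,
-- concatenated in strictly decreasing score order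
def pvBuckets (key : String → Int) (hs : List String) : List String :=
  (PySem.List.sorted (PySem.Set.ofList (hs.map key)) (fun x => x) true).flatMap
    (fun s => hs.filter (fun h => key h == s))

-- insertBy inserts after a block of "not before" elements and in front of a block of "before" ones
theorem pv_insertBy_split {α : Type} (bef : α → α → Bool) (x : α) (l₁ l₂ : List α)
    (h₁ : ∀ b ∈ l₁, bef x b = false) (h₂ : ∀ b ∈ l₂, bef x b = true) :
    PySem.List.insertBy bef x (l₁ ++ l₂) = l₁ ++ x :: l₂ := by
  induction l₁ with
  | nil =>
    cases l₂ with
    | nil => rfl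
    | cons b t => simp [PySem.List.insertBy, h₂ b (by simp)]
  | cons a t ih =>
    have ha := h₁ a (by simp)
    simp only [List.cons_append, PySem.List.insertBy, ha]
    simp only [Bool.false_eq_true, if_false, List.cons.injEq, true_and]
    exact ih (fun b hb => h₁ b (by simp [hb]))

-- a strictly descending list, all elements distinct from c, splits at c's insertion point
theorem pv_drop_lt (S : List Int) (c : Int) (hp : S.Pairwise (fun a b => b < a))
    (hne : ∀ s ∈ S, s ≠ c) :
    ∀ s ∈ S.dropWhile (fun s => decide (c < s)), s < c := by
  induction S with
  | nil => simp
  | cons a S ih =>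
    intro s hs
    by_cases hca : c < a
    · rw [List.dropWhile_cons_of_pos (by simpa using hca)] at hs
      exact ih hp.of_cons (fun t ht => hne t (by simp [ht])) s hs
    · rw [List.dropWhile_cons_of_neg (by simpa using hca)] at hs
      have hac : a < c := lt_of_le_of_ne (not_lt.mp hca) (hne a (by simp))
      rcases List.mem_cons.mp hs with rfl | hs'
      · exact hac
      · exact lt_trans ((List.pairwise_cons.mp hp).1 s hs') hac

-- sorted (reverse) of a Nodup Int list is strictly decreasing
theorem pv_sorted_rev_strict (xs : List Int) (h : xs.Nodup) :
    (PySem.List.sorted xs (fun x => x) true).Pairwise (fun a b => b < a) := by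
  have hge := PySem.List.sorted_pairwise_rev xs (fun x => x)
  have hnd : (PySem.List.sorted xs (fun x => x) true).Nodup :=
    (PySem.List.sorted_perm xs (fun x => x) true).symm.nodup h
  exact (hge.and hnd).imp (fun hab => lt_of_le_of_ne hab.1 (Ne.symm hab.2))

-- flatMap respects pointwise equality on members
theorem pv_flatMap_congr {α β : Type} (l : List α) (f g : α → List β)
    (h : ∀ a ∈ l, f a = g a) : l.flatMap f = l.flatMap g := by
  induction l with
  | nil => rfl
  | cons a t ih =>
    rw [List.flatMap_cons, List.flatMap_cons, h a (by simp),
      ih (fun b hb => h b (by simp [hb]))]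

-- L2: the stable descending sort IS the bucket concatenation
theorem pv_sorted_eq_buckets (key : String → Int) (hs : List String) :
    PySem.List.sorted hs key true = pvBuckets key hs := by
  induction hs using List.reverseRecOn with
  | nil => rfl
  | append_singleton hs x ih =>
    have hL : PySem.List.sorted (hs ++ [x]) key true
        = PySem.List.insertBy (fun a b => decide (key b < key a)) x (PySem.List.sorted hs key true) := by
      rw [PySem.List.sorted_rev_eq_foldl_insertBy, PySem.List.sorted_rev_eq_foldl_insertBy,
        List.foldl_append, List.foldl_cons, List.foldl_nil]
    rw [hL, ih]
    have hnds : (PySem.Set.ofList (hs.map key)).Nodup := PySem.Set.nodup_ofList _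
    have hgt : (PySem.List.sorted (PySem.Set.ofList (hs.map key)) (fun x => x) true).Pairwise
        (fun a b => b < a) := pv_sorted_rev_strict _ hnds
    have hF' : ∀ s : Int, (hs ++ [x]).filter (fun h => key h == s)
        = hs.filter (fun h => key h == s) ++ (if key x == s then [x] else []) := by
      intro s
      rw [List.filter_append]
      congr 1
      by_cases h : key x = s
      · simp [List.filter, h]
      · have hbe : (key x == s) = false := by simp [h]
        simp [List.filter, hbe]
    by_cases hx : key x ∈ PySem.Set.ofList (hs.map key)
    · -- the score of x already occurs: S unchanged, x appended to its bucket
      have hxS : key x ∈ PySem.List.sorted (PySem.Set.ofList (hs.map key)) (fun x => x) true :=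
        (PySem.List.mem_sorted _ _ _ _).mpr hx
      obtain ⟨S₁, S₂, hsplit⟩ := List.append_of_mem hxS
      have hgt' := hsplit ▸ hgt
      rw [List.pairwise_append] at hgt'
      have h1 : ∀ a ∈ S₁, key x < a := fun a ha => hgt'.2.2 a ha (key x) (by simp)
      have h2 : ∀ b ∈ S₂, b < key x := (List.pairwise_cons.mp hgt'.2.1).1
      have hS1mem : ∀ s ∈ S₁, s ∈ PySem.Set.ofList (hs.map key) := by
        intro s hsm
        exact (PySem.List.mem_sorted _ _ _ _).mp (hsplit ▸ (by simp [hsm] : s ∈ S₁ ++ key x :: S₂))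
      unfold pvBuckets
      rw [List.map_append, List.map_cons, List.map_nil, PySem.Set.ofList_append_singleton,
        PySem.Set.add_eq_ite]
      rw [if_pos hx, hsplit, List.flatMap_append, List.flatMap_cons, List.flatMap_append,
        List.flatMap_cons]
      have e1 : S₁.flatMap (fun s => (hs ++ [x]).filter (fun h => key h == s))
          = S₁.flatMap (fun s => hs.filter (fun h => key h == s)) := by
        apply pv_flatMap_congr
        intro s hsm
        rw [hF' s, if_neg (by have := h1 s hsm; simp; omega), List.append_nil]
      have e2 : S₂.flatMap (fun s => (hs ++ [x]).filter (fun h => key h == s))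
          = S₂.flatMap (fun s => hs.filter (fun h => key h == s)) := by
        apply pv_flatMap_congr
        intro s hsm
        rw [hF' s, if_neg (by have := h2 s hsm; simp; omega), List.append_nil]
      rw [e1, e2, hF' (key x), if_pos (by simp)]
      rw [← List.append_assoc]
      rw [pv_insertBy_split _ x
        (S₁.flatMap (fun s => hs.filter (fun h => key h == s)) ++ hs.filter (fun h => key h == key x))
        (S₂.flatMap (fun s => hs.filter (fun h => key h == s))) ?h1 ?h2]
      · simp
      case h1 =>
        intro b hb
        rcases List.mem_append.mp hb with hb1 | hb2
        · obtain ⟨s, hsm, hbf⟩ := List.mem_flatMap.mp hb1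
          have hkb : key b = s := by simpa using List.of_mem_filter hbf
          have := h1 s hsm
          simp; omega
        · have hkb : key b = key x := by simpa using List.of_mem_filter hb2
          simp; omega
      case h2 =>
        intro b hb
        obtain ⟨s, hsm, hbf⟩ := List.mem_flatMap.mp hb
        have hkb : key b = s := by simpa using List.of_mem_filter hbf
        have := h2 s hsm
        simp; omega
    · -- a fresh score: key x is inserted into S, its bucket is [x]
      have hne : ∀ s ∈ PySem.List.sorted (PySem.Set.ofList (hs.map key)) (fun x => x) true,
          s ≠ key x := by
        intro s hsm hcontra
        exact hx (hcontra ▸ (PySem.List.mem_sorted _ _ _ _).mp hsm)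
      have hS := List.takeWhile_append_dropWhile
        (p := fun s => decide (key x < s))
        (l := PySem.List.sorted (PySem.Set.ofList (hs.map key)) (fun x => x) true)
      set S₁ := (PySem.List.sorted (PySem.Set.ofList (hs.map key)) (fun x => x) true).takeWhile
        (fun s => decide (key x < s)) with hS₁def
      set S₂ := (PySem.List.sorted (PySem.Set.ofList (hs.map key)) (fun x => x) true).dropWhile
        (fun s => decide (key x < s)) with hS₂def
      have h1 : ∀ s ∈ S₁, key x < s := by
        intro s hsm
        simpa using List.mem_takeWhile_imp hsm
      have h2 : ∀ s ∈ S₂, s < key x := pv_drop_lt _ _ hgt hne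
      have hS1mem : ∀ s ∈ S₁, s ∈ PySem.Set.ofList (hs.map key) := by
        intro s hsm
        exact (PySem.List.mem_sorted _ _ _ _).mp (hS ▸ List.mem_append.mpr (Or.inl hsm))
      have hS2mem : ∀ s ∈ S₂, s ∈ PySem.Set.ofList (hs.map key) := by
        intro s hsm
        exact (PySem.List.mem_sorted _ _ _ _).mp (hS ▸ List.mem_append.mpr (Or.inr hsm))
      have hSrd : PySem.List.sorted (PySem.Set.ofList (hs.map key) ++ [key x]) (fun x => x) true
          = S₁ ++ key x :: S₂ := by
        rw [PySem.List.sorted_rev_eq_foldl_insertBy, List.foldl_append, List.foldl_cons,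
          List.foldl_nil, ← PySem.List.sorted_rev_eq_foldl_insertBy, ← hS]
        exact pv_insertBy_split _ _ _ _
          (fun b hb => by have := h1 b hb; simp; omega)
          (fun b hb => by have := h2 b hb; simp; omega)
      unfold pvBuckets
      rw [List.map_append, List.map_cons, List.map_nil, PySem.Set.ofList_append_singleton,
        PySem.Set.add_eq_ite, if_neg hx, hSrd, List.flatMap_append, List.flatMap_cons]
      have e1 : S₁.flatMap (fun s => (hs ++ [x]).filter (fun h => key h == s))
          = S₁.flatMap (fun s => hs.filter (fun h => key h == s)) := by
        apply pv_flatMap_congr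
        intro s hsm
        rw [hF' s, if_neg (by have := h1 s hsm; simp; omega), List.append_nil]
      have e2 : S₂.flatMap (fun s => (hs ++ [x]).filter (fun h => key h == s))
          = S₂.flatMap (fun s => hs.filter (fun h => key h == s)) := by
        apply pv_flatMap_congr
        intro s hsm
        rw [hF' s, if_neg (by have := h2 s hsm; simp; omega), List.append_nil]
      have ebx : (hs ++ [x]).filter (fun h => key h == key x) = [x] := by
        rw [hF' (key x), if_pos (by simp)]
        have : hs.filter (fun h => key h == key x) = [] := by
          rw [List.filter_eq_nil_iff]
          intro h hh hcontra
          exact hx ((PySem.Set.mem_ofList _ _).mpr (List.mem_map.mpr ⟨h, hh, by simpa using hcontra⟩))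
        rw [this, List.nil_append]
      rw [e1, e2, ebx, ← hS, List.flatMap_append]
      rw [pv_insertBy_split _ x
        (S₁.flatMap (fun s => hs.filter (fun h => key h == s)))
        (S₂.flatMap (fun s => hs.filter (fun h => key h == s))) ?g1 ?g2]
      · simp
      case g1 =>
        intro b hb
        obtain ⟨s, hsm, hbf⟩ := List.mem_flatMap.mp hb
        have hkb : key b = s := by simpa using List.of_mem_filter hbf
        have := h1 s hsm
        simp; omega
      case g2 =>
        intro b hb
        obtain ⟨s, hsm, hbf⟩ := List.mem_flatMap.mp hb
        have hkb : key b = s := by simpa using List.of_mem_filter hbf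
        have := h2 s hsm
        simp; omega

-- inner while loop computes res ++ bucket.take (k - len res)
theorem pv_innerA_spec (k : Int) (res bucket : List String) :
    pvInnerA k res bucket = res ++ bucket.take ((k - res.length).toNat) := by
  induction bucket generalizing res with
  | nil => simp [pvInnerA]
  | cons h t ih =>
    rw [pvInnerA]
    by_cases hlt : (res.length : Int) < k
    · rw [if_pos hlt, ih]
      have hn : (k - res.length).toNat = ((k - (res ++ [h]).length).toNat) + 1 := by
        simp only [List.length_append, List.length_singleton]
        omega
      rw [hn]
      simp
    · rw [if_neg hlt]
      have : (k - res.length).toNat = 0 := by omega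
      simp [this]

-- find? commutes with filtering away a different key
theorem pv_find_filter_ne (m s : Int) (h : s ≠ m) (t : List (Int × List String)) :
    List.find? (fun p => p.1 == s) (t.filter (fun p => !(p.1 == m)))
      = List.find? (fun p => p.1 == s) t := by
  induction t with
  | nil => rfl
  | cons p t ih =>
    rw [List.filter_cons]
    by_cases hpm : p.1 = m
    · rw [if_neg (by simp [hpm]), ih,
        List.find?_cons_of_neg (by simp [hpm]; exact fun hh => h hh.symm)]
    · by_cases hps : p.1 = s
      · rw [if_pos (by simp [hpm]),
          List.find?_cons_of_pos (by simp [hps]), List.find?_cons_of_pos (by simp [hps])]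
      · rw [if_pos (by simp [hpm]),
          List.find?_cons_of_neg (by simp [hps]), List.find?_cons_of_neg (by simp [hps]), ih]

-- getD after erasing a different key
theorem pv_getD_erase_ne (d : PySem.Dict Int (List String)) (m s : Int) (h : s ≠ m) :
    (d.erase m).getD s [] = d.getD s [] := by
  simp only [PySem.Dict.getD, PySem.Dict.get?, PySem.Dict.erase]
  rw [pv_find_filter_ne m s h d.items]

-- keys after erase
theorem pv_keys_erase (d : PySem.Dict Int (List String)) (m : Int) :
    (d.erase m).keys = d.keys.filter (fun s => !(s == m)) := by
  simp only [PySem.Dict.keys, PySem.Dict.erase]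
  rw [List.filter_map]
  rfl

-- outer while loop computes res ++ (desc-sorted bucket concatenation).take (k - len res)
theorem pv_loopA_spec (k : Int) :
    ∀ N (d : PySem.Dict Int (List String)), d.size ≤ N → ∀ res, d.keys.Nodup →
    pvLoopA k res d =
      res ++ ((PySem.List.sorted d.keys (fun x => x) true).flatMap
        (fun s => d.getD s [])).take ((k - res.length).toNat) := by
  intro N
  induction N with
  | zero =>
    intro d hN res hnd
    have hitems : d.items = [] := by
      have := Nat.le_zero.mp hN
      simpa [PySem.Dict.size] using List.length_eq_zero_iff.mp this
    rw [pvLoopA]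
    rw [if_neg (by simp [PySem.Dict.size, hitems])]
    have hk : d.keys = [] := by simp [PySem.Dict.keys, hitems]
    simp [hk, PySem.List.sorted]
  | succ N ih =>
    intro d hN res hnd
    rw [pvLoopA]
    by_cases hc : (res.length : Int) < k ∧ d.size ≠ 0
    · rw [if_pos hc]
      obtain ⟨hlt, hsz⟩ := hc
      have hkeysne : d.keys ≠ [] := by
        intro hh
        apply hsz
        simp only [PySem.Dict.keys] at hh
        simp [PySem.Dict.size, List.map_eq_nil_iff.mp hh]
      split
      · next hmaxnone =>
        exact absurd ((PySem.List.max?_eq_none_iff _ _).mp hmaxnone) hkeysne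
      · next m hmax =>
        have hm : m ∈ d.keys := PySem.List.max?_mem hmax
        have hmaxall : ∀ y ∈ d.keys, y ≤ m := PySem.List.max?_isMax hmax
        have hfnd : (d.keys.filter (fun s => !(s == m))).Nodup := hnd.filter _
        have hsorted_cons : PySem.List.sorted d.keys (fun x => x) true
            = m :: PySem.List.sorted (d.keys.filter (fun s => !(s == m))) (fun x => x) true := by
          apply PySem.List.sorted_rev_eq_of_perm_of_pairwise_gt
          · have herase : d.keys.filter (fun s => !(s == m)) = d.keys.erase m := by
              rw [List.Nodup.erase_eq_filter hnd]
              rfl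
            refine List.Perm.trans (List.Perm.cons m (PySem.List.sorted_perm _ _ _)) ?_
            rw [herase]
            exact (List.perm_cons_erase hm).symm
          · rw [List.pairwise_cons]
            refine ⟨?_, pv_sorted_rev_strict _ hfnd⟩
            intro b hb
            have hbf : b ∈ d.keys.filter (fun s => !(s == m)) :=
              (PySem.List.mem_sorted _ _ _ _).mp hb
            have hbne : b ≠ m := by simpa using (List.of_mem_filter hbf)
            exact lt_of_le_of_ne (hmaxall b (List.mem_of_mem_filter hbf)) hbne
        have hszN : (d.erase m).size ≤ N := by
          have := pv_size_erase_lt d m hm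
          omega
        have hnd' : (d.erase m).keys.Nodup := by
          rw [pv_keys_erase]
          exact hnd.filter _
        rw [pv_innerA_spec, ih (d.erase m) hszN _ hnd', pv_keys_erase]
        have hcong : (PySem.List.sorted (d.keys.filter (fun s => !(s == m))) (fun x => x) true).flatMap
              (fun s => (d.erase m).getD s [])
            = (PySem.List.sorted (d.keys.filter (fun s => !(s == m))) (fun x => x) true).flatMap
              (fun s => d.getD s []) := by
          apply pv_flatMap_congr
          intro s hsm
          have hsf : s ∈ d.keys.filter (fun s => !(s == m)) :=
            (PySem.List.mem_sorted _ _ _ _).mp hsm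
          exact pv_getD_erase_ne d m s (by simpa using List.of_mem_filter hsf)
        rw [hcong, hsorted_cons, List.flatMap_cons, List.take_append,
          ← List.append_assoc]
        congr 1
        have hlen : ((res ++ (d.getD m []).take ((k - res.length).toNat)).length : Int)
            = (res.length : Int) + min ((k - res.length).toNat) (d.getD m []).length := by
          simp [List.length_append, List.length_take]
        rw [hlen]
        congr 1
        omega
    · rw [if_neg hc]
      rw [not_and] at hc
      by_cases hkk : (res.length : Int) < k
      · have hsz : d.size = 0 := not_ne_iff.mp (hc hkk)
        have hitems : d.items = [] := by
          simpa [PySem.Dict.size] using List.length_eq_zero_iff.mp hsz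
        have hk : d.keys = [] := by simp [PySem.Dict.keys, hitems]
        simp [hk, PySem.List.sorted]
      · have h0 : (k - (res.length : Int)).toNat = 0 := by omega
        simp [h0]

-- A's character-count score equals B's map-sum score (same char set)
theorem pv_score_eq (chars : PySem.Set Char) (h : String) :
    h.toList.foldl (fun s c => if PySem.Set.contains chars c then s + 1 else s - 1) 0
      = pvScore chars h := by
  have : ∀ (a : Int) (c : Char),
      (if PySem.Set.contains chars c then a + 1 else a - 1)
        = a + (if PySem.Set.contains chars c then (1 : Int) else -1) := by
    intro a c; split <;> ring
  have h1 := PySem.List.foldl_congr_mem (l := h.toList) (init := (0 : Int))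
    (f := fun s c => if PySem.Set.contains chars c then s + 1 else s - 1)
    (g := fun a c => a + (if PySem.Set.contains chars c then (1 : Int) else -1))
    (fun a c _ => this a c)
  rw [h1, PySem.List.foldl_add]
  simp [pvScore]

-- both programs equal the bucket concatenation truncated at k
theorem pv_A_eq_buckets (user_handle : String) (handles_array : List String) (k : Int) :
    find_closest_handles_yay user_handle handles_array k
      = (pvBuckets (pvScore (PySem.Set.ofList user_handle.toList)) handles_array).take k.toNat := by
  show pvLoopA k []
      (handles_array.foldl (fun d handle =>
        let score : Int :=
          handle.toList.foldl
            (fun s c => if PySem.Set.contains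
              (user_handle.toList.foldl (fun s c => PySem.Set.add s c) PySem.Set.empty) c
              then s + 1 else s - 1) 0
        if d.contains score then d.modify score [] (fun l => l ++ [handle])
        else d.insert score [handle]) PySem.Dict.empty)
    = (pvBuckets (pvScore (user_handle.toList.foldl (fun s c => PySem.Set.add s c) PySem.Set.empty))
        handles_array).take k.toNat
  generalize user_handle.toList.foldl (fun s c => PySem.Set.add s c) PySem.Set.empty = CS
  -- rewrite the grouping loop into its modify-only form with the shared score function
  have hstep := PySem.List.foldl_congr_mem
    (l := handles_array) (init := (PySem.Dict.empty : PySem.Dict Int (List String)))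
    (f := fun d handle =>
      let score : Int :=
        handle.toList.foldl
          (fun s c => if PySem.Set.contains CS c then s + 1 else s - 1) 0
      if d.contains score then d.modify score [] (fun l => l ++ [handle])
      else d.insert score [handle])
    (g := fun d handle => d.modify (pvScore CS handle) [] (fun l => l ++ [handle]))
    ?_
  · rw [hstep]
    have hkeys : (handles_array.foldl (fun d handle =>
          d.modify (pvScore CS handle) [] (fun l => l ++ [handle])) PySem.Dict.empty).keys
        = PySem.Set.ofList (handles_array.map (pvScore CS)) := by
      rw [PySem.Dict.keys_foldl_modify_key (key := pvScore CS)
        (d0 := []) (f := fun _ handle => fun l => l ++ [handle])]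
      simp [PySem.Dict.keys, PySem.Dict.empty]
      rfl
    have hgetD : ∀ s : Int, (handles_array.foldl (fun d handle =>
          d.modify (pvScore CS handle) [] (fun l => l ++ [handle])) PySem.Dict.empty).getD s []
        = handles_array.filter (fun h => pvScore CS h == s) := by
      intro s
      have hmap : handles_array.foldl (fun d handle =>
            d.modify (pvScore CS handle) [] (fun l => l ++ [handle])) PySem.Dict.empty
          = (handles_array.map (fun h => (pvScore CS h, h))).foldl
            (fun d p => d.modify p.1 [] (fun l => l ++ [p.2])) PySem.Dict.empty := by
        rw [List.foldl_map]
      rw [hmap, PySem.Dict.getD_foldl_modify_append]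
      rw [List.filter_map]
      simp only [List.map_map]
      have he : ((PySem.Dict.empty : PySem.Dict Int (List String)).getD s []) = [] := by
        simp [PySem.Dict.getD, PySem.Dict.get?, PySem.Dict.empty]
      rw [he, List.nil_append]
      have hid : (fun x => x.2) ∘ (fun h => (pvScore CS h, h)) = id := rfl
      rw [hid, List.map_id]
      rfl
    rw [pv_loopA_spec k _ _ (le_refl _) [] (by rw [hkeys]; exact PySem.Set.nodup_ofList _)]
    rw [hkeys]
    have hfun : (fun s => (handles_array.foldl (fun d handle =>
          d.modify (pvScore CS handle) [] (fun l => l ++ [handle])) PySem.Dict.empty).getD s [])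
        = (fun s => handles_array.filter (fun h => pvScore CS h == s)) := by
      funext s
      exact hgetD s
    rw [hfun]
    simp [pvBuckets]
  · -- each grouping step is the modify step
    intro d handle _
    simp only []
    rw [pv_score_eq CS handle]
    by_cases hcont : d.contains (pvScore CS handle)
    · rw [if_pos hcont]
    · rw [if_neg hcont]
      simp only [PySem.Dict.modify]
      rw [PySem.Dict.getD_of_not_contains d [] (by simpa using hcont)]
      rfl

theorem pv_B_eq_buckets (user_handle : String) (handles_array : List String) (k : Int) :
    find_closest_handles_yay_alt user_handle handles_array k
      = (pvBuckets (pvScore (PySem.Set.ofList user_handle.toList)) handles_array).take k.toNat := by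
  show (PySem.List.sorted handles_array (pvScore (PySem.Set.ofList user_handle.toList)) true).take k.toNat = _
  rw [pv_sorted_eq_buckets]

-- ===== VERDICT (by name: the statement is the Claim_ definition above) =====
theorem find_closest_handles_yay_spec : Claim_equal_find_closest_handles_yay := by
  intro user_handle handles_array k _
  unfold Spec_find_closest_handles_yay
  rw [pv_A_eq_buckets, pv_B_eq_buckets]
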